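-- pv_equiv track=rewrite | github.com/enplasmatic/wynn | build.py | ignin
-- ===== SOURCE A (Python) =====
-- def ignin(x: str, target):
--     splitted = ""
--     inString = False
--
--     for i, value in enumerate(x):
--         splitted += value
--
--         if not inString:
--             if value in ["'", '"', "#"]:
--                 if x[min(0, i-1)] != '\\':
--                     inString = True
--                     delimiter = value
--
--             if splitted.endswith(target):
--                     return True
--
--         else:
--             if value == delimiter:
--                 inString = False
--
--     return False
-- ===== SOURCE B (Python) =====
-- def ignin(x: str, target):
--     # Two-pass: mark "active" positions (scanner not inside a string/comment,
--     # with A's exact x[min(0, i-1)] escape guard), then use str.find to locate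
--     # occurrences of target and accept one ending at an active position.
--     if target == "":
--         return len(x) > 0
--     active = []
--     inString = False
--     delim = ''
--     for i, c in enumerate(x):
--         active.append(not inString)
--         if not inString:
--             if c in "'\"#" and x[min(0, i - 1)] != '\\':
--                 inString = True
--                 delim = c
--         elif c == delim:
--             inString = False
--     m = len(target)
--     start = x.find(target)
--     while start != -1:
--         if active[start + m - 1]:
--             return True
--         start = x.find(target, start + 1)
--     return False
-- ===== Notes on version B (the rewrite author's own statement) =====
-- stated objective: faster
-- what changed: A grows a prefix string and calls endswith on it at every character inside one stateful scan; B makes two passes: one scan that only records a boolean 'active' table of positions outside strings/comments (keeping A's exact x[min(0,i-1)] escape guard), then repeated str.find to enumerate occurrences of target and accept one ending at an active position, with the empty target handled as len(x) > 0.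
import Mathlib
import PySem

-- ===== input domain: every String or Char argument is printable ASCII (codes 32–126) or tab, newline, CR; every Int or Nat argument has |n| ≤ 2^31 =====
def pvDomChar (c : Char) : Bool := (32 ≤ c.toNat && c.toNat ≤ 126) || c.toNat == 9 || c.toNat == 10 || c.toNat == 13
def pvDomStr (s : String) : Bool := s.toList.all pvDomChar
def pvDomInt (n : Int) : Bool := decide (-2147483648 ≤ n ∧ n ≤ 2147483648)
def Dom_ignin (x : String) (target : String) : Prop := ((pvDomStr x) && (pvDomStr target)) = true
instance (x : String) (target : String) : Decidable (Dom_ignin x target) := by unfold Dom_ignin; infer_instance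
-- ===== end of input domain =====

-- B replaces A's growing prefix + endswith scan by one state pass recording "active" positions
-- plus repeated str.find over the input (objective: alternative two-pass formulation).

-- ===== PORT A =====
-- Literal transliteration of A's single loop: splitted grows, inString/delim is the scanner
-- state, the buggy guard x[min(0, i-1)] != '\\' is kept via pyGet? on the Int index.
def igninGo (xs target : List Char) (i : Nat) (rest splitted : List Char)
    (inString : Bool) (delim : Char) : Bool :=
  match rest with
  | [] => false
  | c :: rest' =>
    let splitted' := splitted ++ [c]
    if inString = false then
      let st' : Bool × Char :=
        if (c = '\'' ∨ c = '"' ∨ c = '#') ∧ PySem.List.pyGet? xs (min 0 ((i : Int) - 1)) ≠ some '\\'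
        then (true, c) else (false, delim)
      if PySem.Chars.endswith splitted' target then true
      else igninGo xs target (i+1) rest' splitted' st'.1 st'.2
    else
      if c = delim then igninGo xs target (i+1) rest' splitted' false delim
      else igninGo xs target (i+1) rest' splitted' true delim

def ignin (x : String) (target : String) : Bool :=
  -- Python's `delimiter` is unbound until first set and never read before; ' ' is the placeholder
  igninGo x.toList target.toList 0 x.toList [] false ' '

-- ===== PORT B =====
-- pass 1 of Source B: record, per position, whether the scanner is outside a string/comment there
def activeGo (xs : List Char) (i : Nat) (rest : List Char)
    (inString : Bool) (delim : Char) (active : List Bool) : List Bool :=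
  match rest with
  | [] => active
  | c :: rest' =>
    let active' := active ++ [!inString]
    if inString = false then
      if (c = '\'' ∨ c = '"' ∨ c = '#') ∧ PySem.List.pyGet? xs (min 0 ((i : Int) - 1)) ≠ some '\\'
      then activeGo xs (i+1) rest' true c active'
      else activeGo xs (i+1) rest' false delim active'
    else
      if c = delim then activeGo xs (i+1) rest' false delim active'
      else activeGo xs (i+1) rest' true delim active'

-- termination helper for the find loop (cited by decreasing_by)
theorem pvFindFrom_bounds (s sub : List Char) (k : Nat)
    (h : PySem.Chars.findFrom s sub (k : Int) none ≠ -1) :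
    k ≤ (PySem.Chars.findFrom s sub (k : Int) none).toNat ∧
      (PySem.Chars.findFrom s sub (k : Int) none).toNat ≤ s.length ∧ k ≤ s.length := by
  unfold PySem.Chars.findFrom at h ⊢
  by_cases hk : (s.length : Int) < (k : Int)
  · simp [hk, show ¬ ((k:Int) < 0) by omega] at h
  · have hk' : k ≤ s.length := by exact_mod_cast not_lt.mp hk
    have hnn : ¬ ((k:Int) < 0) := by omega
    simp only [hnn, if_false, hk, if_false] at h ⊢
    set r := PySem.Chars.find (List.drop ((k:Int)).toNat (List.take ((s.length:Int)).toNat s)) sub with hr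
    by_cases h0 : r = -1
    · simp [h0] at h
    · have hge : 0 ≤ r := by
        have := PySem.Chars.neg_one_le_find (List.drop ((k:Int)).toNat (List.take ((s.length:Int)).toNat s)) sub
        omega
      have hle : r ≤ (List.drop ((k:Int)).toNat (List.take ((s.length:Int)).toNat s)).length := PySem.Chars.find_le_length _ _
      simp only [h0, if_false] at h ⊢
      simp only [List.length_drop, List.length_take, Int.toNat_natCast] at hle
      refine ⟨by omega, by omega, hk'⟩

-- pass 2 of Source B: the `while start != -1` loop over x.find(target, start)
def findLoop (xs target : List Char) (active : List Bool) (start : Nat) : Bool :=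
  let r := PySem.Chars.findFrom xs target (start : Int) none
  if h : r = -1 then false
  else if active.getD (r.toNat + target.length - 1) false then true
  else findLoop xs target active (r.toNat + 1)
termination_by xs.length + 1 - start
decreasing_by
  have := pvFindFrom_bounds xs target start h
  omega

def ignin_alt (x : String) (target : String) : Bool :=
  let xs := x.toList
  let tgt := target.toList
  if tgt = [] then decide (0 < xs.length)
  else findLoop xs tgt (activeGo xs 0 xs false ' ' []) 0

-- ===== PRECONDITION & SPEC =====
def Spec_ignin (x : String) (target : String) (out : Bool) : Prop := out = ignin_alt x target
instance (x : String) (target : String) (out : Bool) : Decidable (Spec_ignin x target out) := by unfold Spec_ignin; infer_instance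

-- ===== CLAIM (what is proved, stated in full; the proofs are below) =====
def Claim_equal_ignin : Prop := ∀ (x : String) (target : String), Dom_ignin x target → Spec_ignin x target (ignin x target)

-- ===== LEMMAS AND PROOFS =====

-- the scanner state (inString, delim) before position j, shared characterisation of both ports
def pvStep (xs : List Char) (j : Nat) (st : Bool × Char) : Bool × Char :=
  let c := xs.getD j ' '
  if st.1 = false then
    if (c = '\'' ∨ c = '"' ∨ c = '#') ∧ PySem.List.pyGet? xs (min 0 ((j : Int) - 1)) ≠ some '\\'
    then (true, c) else st
  else if c = st.2 then (false, st.2) else st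

def pvSt (xs : List Char) : Nat → Bool × Char
  | 0 => (false, ' ')
  | j+1 => pvStep xs j (pvSt xs j)

lemma exists_ge_succ_iff {P : Nat → Prop} (j : Nat) (hP : ¬ P j) :
    (∃ k, j ≤ k ∧ P k) ↔ (∃ k, j+1 ≤ k ∧ P k) := by
  constructor
  · rintro ⟨k, hk, hp⟩
    rcases Nat.eq_or_lt_of_le hk with rfl | h
    · exact absurd hp hP
    · exact ⟨k, h, hp⟩
  · rintro ⟨k, hk, hp⟩; exact ⟨k, by omega, hp⟩

lemma igninGo_cons_false (xs target : List Char) (j : Nat) (c : Char) (rest' sp : List Char) (d : Char) :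
    igninGo xs target j (c :: rest') sp false d =
      if PySem.Chars.endswith (sp ++ [c]) target then true
      else if (c = '\'' ∨ c = '"' ∨ c = '#') ∧ PySem.List.pyGet? xs (min 0 ((j : Int) - 1)) ≠ some '\\'
        then igninGo xs target (j+1) rest' (sp ++ [c]) true c
        else igninGo xs target (j+1) rest' (sp ++ [c]) false d := by
  simp only [igninGo]
  split_ifs <;> simp_all

lemma igninGo_cons_true (xs target : List Char) (j : Nat) (c : Char) (rest' sp : List Char) (d : Char) :
    igninGo xs target j (c :: rest') sp true d =
      if c = d then igninGo xs target (j+1) rest' (sp ++ [c]) false d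
      else igninGo xs target (j+1) rest' (sp ++ [c]) true d := by
  simp only [igninGo]
  split_ifs <;> simp_all

lemma pvStep_false (xs : List Char) (j : Nat) (d : Char) :
    pvStep xs j (false, d) =
      if (xs.getD j ' ' = '\'' ∨ xs.getD j ' ' = '"' ∨ xs.getD j ' ' = '#') ∧
          PySem.List.pyGet? xs (min 0 ((j : Int) - 1)) ≠ some '\\'
      then (true, xs.getD j ' ') else (false, d) := by
  simp [pvStep]

lemma pvStep_true (xs : List Char) (j : Nat) (d : Char) :
    pvStep xs j (true, d) = if xs.getD j ' ' = d then (false, d) else (true, d) := by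
  simp [pvStep]

lemma igninGo_iff (xs target : List Char) :
    ∀ rest j (st : Bool × Char), rest = xs.drop j → st = pvSt xs j →
    (igninGo xs target j rest (xs.take j) st.1 st.2 = true ↔
      ∃ k, j ≤ k ∧ k < xs.length ∧ (pvSt xs k).1 = false ∧ target <:+ xs.take (k+1)) := by
  intro rest
  induction rest with
  | nil =>
    intro j st hr hst
    have hj : xs.length ≤ j := by
      rw [eq_comm, List.drop_eq_nil_iff] at hr; exact hr
    simp only [igninGo]
    constructor
    · intro h; exact absurd h (by simp)
    · rintro ⟨k, hk1, hk2, _⟩; omega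
  | cons c rest' ih =>
    intro j st hr hst
    obtain ⟨b, d⟩ := st
    have hj : j < xs.length := by
      by_contra hcon
      rw [List.drop_eq_nil_of_le (not_lt.mp hcon)] at hr; simp at hr
    have hcj : xs[j]? = some c := by
      have h2 : (xs.drop j).head? = xs[j]? := List.head?_drop
      rw [← hr] at h2; simpa using h2.symm
    have hgetD : xs.getD j ' ' = c := by simp [List.getD, hcj]
    have htake : xs.take (j+1) = xs.take j ++ [c] := by
      simp [List.take_add_one, hcj]
    have hdrop : xs.drop (j+1) = rest' := by
      have h2 : List.drop 1 (xs.drop j) = rest' := by rw [← hr]; rfl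
      rw [← h2, List.drop_drop]
    have hstep : pvSt xs (j+1) = pvStep xs j (b, d) := by rw [hst]; rfl
    cases b with
    | false =>
      have hPst : (pvSt xs j).1 = false := by rw [← hst]
      by_cases hq : (c = '\'' ∨ c = '"' ∨ c = '#') ∧ PySem.List.pyGet? xs (min 0 ((j : Int) - 1)) ≠ some '\\'
      all_goals by_cases he : PySem.Chars.endswith (xs.take j ++ [c]) target = true
      -- four subgoals: (hq, he), (hq, ¬he), (¬hq, he), (¬hq, ¬he)
      · rw [igninGo_cons_false, if_pos he]
        refine iff_of_true rfl ⟨j, le_refl j, hj, hPst, ?_⟩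
        rw [htake]; exact (PySem.Chars.endswith_iff _ _).mp he
      · rw [igninGo_cons_false, if_neg he, if_pos hq]
        have hst' : pvSt xs (j+1) = (true, c) := by
          rw [hstep, pvStep_false, hgetD]; exact if_pos hq
        have hrec : igninGo xs target (j+1) rest' (xs.take j ++ [c]) true c = true ↔
            ∃ k, j+1 ≤ k ∧ k < xs.length ∧ (pvSt xs k).1 = false ∧ target <:+ xs.take (k+1) := by
          rw [← htake]; exact ih (j+1) (true, c) hdrop.symm hst'.symm
        rw [hrec]
        refine (exists_ge_succ_iff j ?_).symm
        rintro ⟨_, _, hsuf⟩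
        rw [htake] at hsuf
        exact he ((PySem.Chars.endswith_iff _ _).mpr hsuf)
      · rw [igninGo_cons_false, if_pos he]
        refine iff_of_true rfl ⟨j, le_refl j, hj, hPst, ?_⟩
        rw [htake]; exact (PySem.Chars.endswith_iff _ _).mp he
      · rw [igninGo_cons_false, if_neg he, if_neg hq]
        have hst' : pvSt xs (j+1) = (false, d) := by
          rw [hstep, pvStep_false, hgetD]; exact if_neg hq
        have hrec : igninGo xs target (j+1) rest' (xs.take j ++ [c]) false d = true ↔
            ∃ k, j+1 ≤ k ∧ k < xs.length ∧ (pvSt xs k).1 = false ∧ target <:+ xs.take (k+1) := by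
          rw [← htake]; exact ih (j+1) (false, d) hdrop.symm hst'.symm
        rw [hrec]
        refine (exists_ge_succ_iff j ?_).symm
        rintro ⟨_, _, hsuf⟩
        rw [htake] at hsuf
        exact he ((PySem.Chars.endswith_iff _ _).mpr hsuf)
    | true =>
      have hPst : (pvSt xs j).1 = true := by rw [← hst]
      have hnotP : ¬ (j < xs.length ∧ (pvSt xs j).1 = false ∧ target <:+ xs.take (j+1)) := by
        rintro ⟨_, hfalse, _⟩; rw [hPst] at hfalse; exact absurd hfalse (by simp)
      by_cases hcd : c = d
      · rw [igninGo_cons_true, if_pos hcd]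
        have hst' : pvSt xs (j+1) = (false, d) := by
          rw [hstep, pvStep_true, hgetD]; exact if_pos hcd
        have hrec : igninGo xs target (j+1) rest' (xs.take j ++ [c]) false d = true ↔
            ∃ k, j+1 ≤ k ∧ k < xs.length ∧ (pvSt xs k).1 = false ∧ target <:+ xs.take (k+1) := by
          rw [← htake]; exact ih (j+1) (false, d) hdrop.symm hst'.symm
        rw [hrec]
        exact (exists_ge_succ_iff j hnotP).symm
      · rw [igninGo_cons_true, if_neg hcd]
        have hst' : pvSt xs (j+1) = (true, d) := by
          rw [hstep, pvStep_true, hgetD]; exact if_neg hcd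
        have hrec : igninGo xs target (j+1) rest' (xs.take j ++ [c]) true d = true ↔
            ∃ k, j+1 ≤ k ∧ k < xs.length ∧ (pvSt xs k).1 = false ∧ target <:+ xs.take (k+1) := by
          rw [← htake]; exact ih (j+1) (true, d) hdrop.symm hst'.symm
        rw [hrec]
        exact (exists_ge_succ_iff j hnotP).symm

lemma activeGo_cons_false (xs : List Char) (j : Nat) (c : Char) (rest' : List Char) (d : Char) (acc : List Bool) :
    activeGo xs j (c :: rest') false d acc =
      if (c = '\'' ∨ c = '"' ∨ c = '#') ∧ PySem.List.pyGet? xs (min 0 ((j : Int) - 1)) ≠ some '\\'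
      then activeGo xs (j+1) rest' true c (acc ++ [true])
      else activeGo xs (j+1) rest' false d (acc ++ [true]) := by
  simp only [activeGo]
  split_ifs <;> simp_all

lemma activeGo_cons_true (xs : List Char) (j : Nat) (c : Char) (rest' : List Char) (d : Char) (acc : List Bool) :
    activeGo xs j (c :: rest') true d acc =
      if c = d then activeGo xs (j+1) rest' false d (acc ++ [false])
      else activeGo xs (j+1) rest' true d (acc ++ [false]) := by
  simp only [activeGo]
  split_ifs <;> simp_all

lemma activeGo_eq (xs : List Char) :
    ∀ rest j (st : Bool × Char) acc, rest = xs.drop j → st = pvSt xs j →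
    activeGo xs j rest st.1 st.2 acc
      = acc ++ (List.range' j (xs.length - j)).map (fun k => !(pvSt xs k).1) := by
  intro rest
  induction rest with
  | nil =>
    intro j st acc hr hst
    have hj : xs.length ≤ j := by
      rw [eq_comm, List.drop_eq_nil_iff] at hr; exact hr
    have : xs.length - j = 0 := by omega
    simp [activeGo, this]
  | cons c rest' ih =>
    intro j st acc hr hst
    obtain ⟨b, d⟩ := st
    have hj : j < xs.length := by
      by_contra hcon
      rw [List.drop_eq_nil_of_le (not_lt.mp hcon)] at hr; simp at hr
    have hcj : xs[j]? = some c := by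
      have h2 : (xs.drop j).head? = xs[j]? := List.head?_drop
      rw [← hr] at h2; simpa using h2.symm
    have hgetD : xs.getD j ' ' = c := by simp [List.getD, hcj]
    have hdrop : xs.drop (j+1) = rest' := by
      have h2 : List.drop 1 (xs.drop j) = rest' := by rw [← hr]; rfl
      rw [← h2, List.drop_drop]
    have hstep : pvSt xs (j+1) = pvStep xs j (b, d) := by rw [hst]; rfl
    have hrange : List.range' j (xs.length - j) = j :: List.range' (j+1) (xs.length - (j+1)) := by
      have h1 : xs.length - j = (xs.length - (j+1)) + 1 := by omega
      rw [h1, List.range'_succ]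
    have hhead : (pvSt xs j).1 = b := by rw [← hst]
    rw [hrange, List.map_cons, hhead]
    cases b with
    | false =>
      by_cases hq : (c = '\'' ∨ c = '"' ∨ c = '#') ∧ PySem.List.pyGet? xs (min 0 ((j : Int) - 1)) ≠ some '\\'
      · rw [activeGo_cons_false, if_pos hq]
        have hst' : pvSt xs (j+1) = (true, c) := by
          rw [hstep, pvStep_false, hgetD]; exact if_pos hq
        have := ih (j+1) (true, c) (acc ++ [true]) hdrop.symm hst'.symm
        rw [this]; simp
      · rw [activeGo_cons_false, if_neg hq]
        have hst' : pvSt xs (j+1) = (false, d) := by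
          rw [hstep, pvStep_false, hgetD]; exact if_neg hq
        have := ih (j+1) (false, d) (acc ++ [true]) hdrop.symm hst'.symm
        rw [this]; simp
    | true =>
      by_cases hcd : c = d
      · rw [activeGo_cons_true, if_pos hcd]
        have hst' : pvSt xs (j+1) = (false, d) := by
          rw [hstep, pvStep_true, hgetD]; exact if_pos hcd
        have := ih (j+1) (false, d) (acc ++ [false]) hdrop.symm hst'.symm
        rw [this]; simp
      · rw [activeGo_cons_true, if_neg hcd]
        have hst' : pvSt xs (j+1) = (true, d) := by
          rw [hstep, pvStep_true, hgetD]; exact if_neg hcd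
        have := ih (j+1) (true, d) (acc ++ [false]) hdrop.symm hst'.symm
        rw [this]; simp

lemma pvFindFrom_gt (s sub : List Char) (k : Nat) (h : s.length < k) :
    PySem.Chars.findFrom s sub (k : Int) none = -1 := by
  unfold PySem.Chars.findFrom
  have h1 : ¬ ((k : Int) < 0) := by omega
  have h2 : (s.length : Int) < (k : Int) := by exact_mod_cast h
  simp [h1, h2]

lemma findLoop_iff_aux (xs target : List Char) (hsub : target ≠ [])
    (active : List Bool)
    (hact : active = (List.range xs.length).map (fun k => !(pvSt xs k).1)) :
    ∀ d start : Nat, xs.length + 1 - start ≤ d →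
    (findLoop xs target active start = true ↔
      ∃ p, start ≤ p ∧ p + target.length ≤ xs.length ∧ target <+: xs.drop p ∧
        (pvSt xs (p + target.length - 1)).1 = false) := by
  have hm : 0 < target.length := List.length_pos_iff.mpr hsub
  intro d
  induction d with
  | zero =>
    intro start hd
    have hgt : xs.length < start := by omega
    rw [findLoop, dif_pos (pvFindFrom_gt xs target start hgt)]
    constructor
    · intro h; exact absurd h (by simp)
    · rintro ⟨p, hp1, hp2, _⟩; omega
  | succ d ihd =>
    intro start hd
    rw [findLoop]
    by_cases hneg : PySem.Chars.findFrom xs target (start : Int) none = -1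
    · rw [dif_pos hneg]
      constructor
      · intro h; exact absurd h (by simp)
      · rintro ⟨p, hp1, hp2, hpre, _⟩
        by_cases hk : start ≤ xs.length
        · exfalso
          have hno := (PySem.Chars.findFrom_natCast_eq_neg_one_iff xs target start hk).mp hneg
          apply hno
          have hdd : (xs.drop start).drop (p - start) = xs.drop p := by
            rw [List.drop_drop]; congr 1; omega
          have : target <+: (xs.drop start).drop (p - start) := by rw [hdd]; exact hpre
          have hisin : PySem.Chars.isIn target (xs.drop start) = true :=
            (PySem.Chars.exists_prefix_drop_iff_isIn _ _).mp ⟨p - start, this⟩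
          exact (PySem.Chars.isIn_iff_infix _ _).mp hisin
        · omega
    · have hb := pvFindFrom_bounds xs target start hneg
      set r := PySem.Chars.findFrom xs target (start : Int) none with hrdef
      have hspec := PySem.Chars.findFrom_natCast_spec xs target start hb.2.2 hneg
      have hpre : target <+: xs.drop r.toNat := hspec.2.1
      have hrm : r.toNat + target.length ≤ xs.length := by
        have := hpre.length_le
        simp only [List.length_drop] at this
        omega
      have hidx : r.toNat + target.length - 1 < xs.length := by omega
      have hgetD : active.getD (r.toNat + target.length - 1) false
          = !(pvSt xs (r.toNat + target.length - 1)).1 := by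
        rw [hact, List.getD, List.getElem?_map, List.getElem?_range hidx]
        rfl
      rw [dif_neg hneg, hgetD]
      by_cases hstate : (pvSt xs (r.toNat + target.length - 1)).1 = false
      · rw [hstate]
        simp only [Bool.not_false]
        rw [if_pos trivial]
        exact iff_of_true rfl ⟨r.toNat, by omega, hrm, hpre, hstate⟩
      · have hstate' : (pvSt xs (r.toNat + target.length - 1)).1 = true := by
          revert hstate; cases (pvSt xs (r.toNat + target.length - 1)).1 <;> simp
        rw [hstate']
        simp only [Bool.not_true, Bool.false_eq_true, if_false]
        rw [ihd (r.toNat + 1) (by omega)]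
        constructor
        · rintro ⟨p, hp1, hp2, hp3, hp4⟩
          exact ⟨p, by omega, hp2, hp3, hp4⟩
        · rintro ⟨p, hp1, hp2, hp3, hp4⟩
          refine ⟨p, ?_, hp2, hp3, hp4⟩
          rcases Nat.lt_or_ge p (r.toNat + 1) with hlt | hge
          · rcases Nat.lt_or_ge p r.toNat with hlt2 | hge2
            · exact absurd hp3 (hspec.2.2 p hp1 hlt2)
            · have : p = r.toNat := by omega
              rw [this] at hp4
              rw [hstate'] at hp4
              exact absurd hp4 (by simp)
          · exact hge
        
lemma suffix_take_iff (xs target : List Char) (k : Nat) (hk : k < xs.length) :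
    target <:+ xs.take (k+1) ↔
      target.length ≤ k+1 ∧ target <+: xs.drop (k+1-target.length) := by
  have hlen : (xs.take (k+1)).length = k+1 := by rw [List.length_take]; omega
  set m := target.length with hmdef
  constructor
  · intro h
    have hle : m ≤ k+1 := by have := h.length_le; omega
    refine ⟨hle, ?_⟩
    have h2 : (xs.take (k+1)).drop (k+1 - m) = (xs.drop (k+1-m)).take m := by
      rw [List.drop_take]; congr 1; omega
    have heq := List.suffix_iff_eq_drop.mp h
    rw [hlen, ← hmdef] at heq
    rw [heq, h2]
    exact List.take_prefix _ _
  · rintro ⟨hle, hpre⟩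
    have h2 : (xs.take (k+1)).drop (k+1 - m) = (xs.drop (k+1-m)).take m := by
      rw [List.drop_take]; congr 1; omega
    rw [List.suffix_iff_eq_drop, hlen, ← hmdef, h2]
    have heq := List.prefix_iff_eq_take.mp hpre
    rw [← hmdef] at heq
    exact heq

lemma ignin_iff (x target : String) :
    (ignin x target = true ↔
      ∃ k, k < x.toList.length ∧ (pvSt x.toList k).1 = false ∧
        target.toList <:+ x.toList.take (k+1)) := by
  have h := igninGo_iff x.toList target.toList x.toList 0 (false, ' ') rfl rfl
  simp only [List.take_zero] at h
  rw [ignin]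
  rw [h]
  constructor
  · rintro ⟨k, _, hk⟩; exact ⟨k, hk⟩
  · rintro ⟨k, hk⟩; exact ⟨k, Nat.zero_le k, hk⟩

-- ===== VERDICT (by name: the statement is the Claim_ definition above) =====
theorem ignin_spec : Claim_equal_ignin := by
  unfold Claim_equal_ignin
  intro x target _
  unfold Spec_ignin
  rw [Bool.eq_iff_iff, ignin_iff]
  rw [ignin_alt]
  by_cases hnil : target.toList = []
  · rw [if_pos hnil]
    simp only [decide_eq_true_eq]
    constructor
    · rintro ⟨k, hk, _⟩; omega
    · intro h
      refine ⟨0, h, rfl, ?_⟩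
      rw [hnil]; exact List.nil_suffix
  · rw [if_neg hnil]
    have hact : activeGo x.toList 0 x.toList false ' ' []
        = (List.range x.toList.length).map (fun k => !(pvSt x.toList k).1) := by
      have h := activeGo_eq x.toList x.toList 0 (false, ' ') [] rfl rfl
      rw [h, List.range_eq_range']
      simp
    rw [findLoop_iff_aux x.toList target.toList hnil _ hact (x.toList.length + 1) 0 (by omega)]
    have hm : 0 < target.toList.length := List.length_pos_iff.mpr hnil
    constructor
    · rintro ⟨k, hk, hst, hsuf⟩
      obtain ⟨hle, hpre⟩ := (suffix_take_iff _ _ _ hk).mp hsuf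
      refine ⟨k + 1 - target.toList.length, Nat.zero_le _, by omega, hpre, ?_⟩
      have : k + 1 - target.toList.length + target.toList.length - 1 = k := by omega
      rw [this]; exact hst
    · rintro ⟨p, _, hp2, hpre, hst⟩
      refine ⟨p + target.toList.length - 1, by omega, hst, ?_⟩
      rw [suffix_take_iff _ _ _ (by omega)]
      refine ⟨by omega, ?_⟩
      have : p + target.toList.length - 1 + 1 - target.toList.length = p := by omega
      rw [this]; exact hpre
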